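-- pv_equiv track=rewrite | github.com/palette-knife25/poetry-generation | trigram_markov_poetry.py | gen_trigrams
-- ===== SOURCE A (Python) =====
-- def gen_trigrams(sentences):
--     """
--     This function generates list of REVERSED trigrams from sentences
--     :param sentences: list of sentences, each sentence - list of tokens
--     :return: list of trigrams, each trigram - list of 3 tokens
--     """
--     trigrams = []
--     for sentence in sentences:
--         i = len(sentence)-1
--         while (i-2) >= 0:
--             ngram = [sentence[i], sentence[i-1], sentence[i-2]]
--             trigrams.append(ngram)
--             i -= 1
--     return trigrams
-- ===== SOURCE B (Python) =====
-- def gen_trigrams(sentences):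
--     """
--     This function generates list of REVERSED trigrams from sentences
--     :param sentences: list of sentences, each sentence - list of tokens
--     :return: list of trigrams, each trigram - list of 3 tokens
--     """
--     return [list(t)
--             for sentence in sentences
--             for t in reversed(list(zip(sentence[2:], sentence[1:], sentence)))]
-- ===== Notes on version B (the rewrite author's own statement) =====
-- stated objective: idiomatic
-- what changed: Replaces the explicit backward index-stepping while loop over each sentence with parallel iteration over three shifted slices (zip(sentence[2:], sentence[1:], sentence)), reversed per sentence, collected by a single comprehension.
import Mathlib
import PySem

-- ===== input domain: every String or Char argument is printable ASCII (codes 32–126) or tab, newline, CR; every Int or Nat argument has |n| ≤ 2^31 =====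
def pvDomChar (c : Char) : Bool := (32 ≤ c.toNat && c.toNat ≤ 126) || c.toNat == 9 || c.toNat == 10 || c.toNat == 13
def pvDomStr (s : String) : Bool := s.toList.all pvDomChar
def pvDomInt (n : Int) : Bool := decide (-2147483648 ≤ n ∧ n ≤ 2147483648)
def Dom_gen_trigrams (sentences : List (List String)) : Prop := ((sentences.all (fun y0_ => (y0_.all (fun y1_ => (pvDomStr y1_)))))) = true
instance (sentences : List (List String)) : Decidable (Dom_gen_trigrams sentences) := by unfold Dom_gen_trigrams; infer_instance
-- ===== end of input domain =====

-- B replaces A's backward index-stepping while loop by parallel iteration over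
-- three shifted slices (zip), reversed per sentence (idiomatic; same cost).

-- ===== PORT A =====
-- the inner 'while (i-2) >= 0' loop: emits [s[i], s[i-1], s[i-2]] and steps i down
def pvALoop (s : List String) : Nat → List (List String)
  | 0 => []
  | 1 => []
  | (i+2) => [s.getD (i+2) "", s.getD (i+1) "", s.getD i ""] :: pvALoop s (i+1)

def gen_trigrams (sentences : List (List String)) : List (List String) :=
  sentences.foldl (fun trigrams sentence => trigrams ++ pvALoop sentence (sentence.length - 1)) []

-- ===== PORT B =====
-- zip(sentence[2:], sentence[1:], sentence), each tuple listed, reversed per sentence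
def gen_trigrams_alt (sentences : List (List String)) : List (List String) :=
  sentences.flatMap (fun s =>
    (((s.drop 2).zip ((s.drop 1).zip s)).map (fun p => [p.1, p.2.1, p.2.2])).reverse)

-- ===== PRECONDITION & SPEC =====
def Spec_gen_trigrams (sentences : List (List String)) (out : List (List String)) : Prop := out = gen_trigrams_alt sentences
instance (sentences : List (List String)) (out : List (List String)) : Decidable (Spec_gen_trigrams sentences out) := by unfold Spec_gen_trigrams; infer_instance

-- ===== CLAIM (what is proved, stated in full; the proofs are below) =====
def Claim_equal_gen_trigrams : Prop := ∀ (sentences : List (List String)), Dom_gen_trigrams sentences → Spec_gen_trigrams sentences (gen_trigrams sentences)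

-- ===== LEMMAS AND PROOFS =====

-- B's per-sentence zip list
def pvZ (s : List String) : List (List String) :=
  ((s.drop 2).zip ((s.drop 1).zip s)).map (fun p => [p.1, p.2.1, p.2.2])

lemma pvZ_length (s : List String) : (pvZ s).length = s.length - 2 := by
  simp [pvZ]; omega

lemma pvZ_getElem (s : List String) (m : Nat) (h : m + 2 < s.length) :
    (pvZ s)[m]'(by rw [pvZ_length]; omega) =
      [s[m+2]'(by omega), s[m+1]'(by omega), s[m]'(by omega)] := by
  simp [pvZ]
  congr 1
  omega

-- A's loop from index i equals the first (i-1) entries of B's zip list, reversed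
lemma pvALoop_eq_take (s : List String) :
    ∀ i, i < s.length → pvALoop s i = ((pvZ s).take (i-1)).reverse := by
  intro i
  induction i with
  | zero => intro _; simp [pvALoop]
  | succ n ih =>
    cases n with
    | zero => intro _; simp [pvALoop]
    | succ m =>
      intro h
      have hm : m + 2 < s.length := h
      have hz : m < (pvZ s).length := by rw [pvZ_length]; omega
      have : (pvZ s).take (m + 1) = (pvZ s).take m ++ [(pvZ s)[m]'hz] := by
        rw [List.take_add_one, List.getElem?_eq_getElem hz]; rfl
      rw [pvALoop, ih (by omega)]
      simp only [Nat.succ_sub_one, this, List.reverse_append,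
        List.reverse_cons, List.reverse_nil, List.nil_append, List.cons_append,
        pvZ_getElem s m hm]
      rw [List.getD_eq_getElem s "" (by omega : m + 2 < s.length),
        List.getD_eq_getElem s "" (by omega : m + 1 < s.length),
        List.getD_eq_getElem s "" (by omega : m < s.length)]

lemma pvALoop_top (s : List String) :
    pvALoop s (s.length - 1) = (pvZ s).reverse := by
  cases s with
  | nil => simp [pvALoop, pvZ]
  | cons a t =>
    have h1 : (a :: t).length - 1 < (a :: t).length := by simp
    rw [pvALoop_eq_take _ _ h1,
      List.take_of_length_le (by rw [pvZ_length]; omega)]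

-- ===== VERDICT (by name: the statement is the Claim_ definition above) =====
theorem gen_trigrams_spec : Claim_equal_gen_trigrams := by
  intro sentences _
  unfold Spec_gen_trigrams gen_trigrams gen_trigrams_alt
  rw [PySem.List.foldl_append_eq_flatMap]
  simp only [List.nil_append]
  apply List.flatMap_congr  -- congruence over sentences
  intro s _
  exact pvALoop_top s
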